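-- pv_equiv track=rewrite | github.com/swasun/RFOMT | code/vizualisation/csv_to_figure_these.py | get_index_of_first_last_repeted_elemen
-- ===== SOURCE A (Python) =====
-- def get_index_of_first_last_repeted_elemen(iterabl):
--     last_elem = iterabl[-1]
--     reversed_idx = 0
--     for idx, elm in enumerate(iterabl[::-1]):
--         if elm != last_elem:
--             break
--         reversed_idx = -(idx+1)
--
--     index_flat = len(iterabl) + reversed_idx
--     return index_flat
-- ===== SOURCE B (Python) =====
-- def get_index_of_first_last_repeted_elemen(iterabl):
--     last_elem = iterabl[-1]
--     start = 0
--     for idx, elm in enumerate(iterabl):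
--         if elm != last_elem:
--             start = idx + 1
--     return start
-- ===== Notes on version B (the rewrite author's own statement) =====
-- stated objective: alternative
-- what changed: Replaces A's reverse-slice scan with break and negative-index accumulator by a single forward pass that tracks the index just past the last element differing from iterabl[-1], returning it directly.
import Mathlib
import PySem

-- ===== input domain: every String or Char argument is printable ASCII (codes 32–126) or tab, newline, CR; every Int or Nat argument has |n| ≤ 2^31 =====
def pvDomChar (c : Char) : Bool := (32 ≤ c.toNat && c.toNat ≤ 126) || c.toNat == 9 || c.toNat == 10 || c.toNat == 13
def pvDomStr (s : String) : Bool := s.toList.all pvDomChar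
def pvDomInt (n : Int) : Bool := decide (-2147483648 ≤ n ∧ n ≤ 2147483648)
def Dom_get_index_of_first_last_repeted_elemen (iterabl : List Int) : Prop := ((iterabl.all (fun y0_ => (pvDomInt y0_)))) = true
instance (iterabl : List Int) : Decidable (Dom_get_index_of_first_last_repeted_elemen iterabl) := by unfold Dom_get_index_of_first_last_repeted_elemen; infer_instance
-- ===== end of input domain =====

-- B replaces A's reverse scan with break by a forward pass tracking the index past the last
-- element that differs from iterabl[-1]; same O(n) cost, different decomposition.

-- ===== PORT A =====
-- the for-loop with break over iterabl[::-1]: state (idx, reversed_idx), break = return reversed_idx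
def pvALoop (last : Int) : List Int → Int → Int → Int
  | [], _, r => r
  | e :: t, idx, r => if e ≠ last then r else pvALoop last t (idx + 1) (-(idx + 1))

def get_index_of_first_last_repeted_elemen (iterabl : List Int) : Int :=
  match PySem.List.pyGet? iterabl (-1) with
  | none => 0   -- unreachable under Pre_: empty list raises IndexError in Python
  | some last_elem =>
    match PySem.List.slice? iterabl none none (-1) with
    | none => 0   -- unreachable: step is -1 ≠ 0
    | some rev => (iterabl.length : Int) + pvALoop last_elem rev 0 0

-- ===== PORT B =====
def get_index_of_first_last_repeted_elemen_alt (iterabl : List Int) : Int :=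
  match PySem.List.pyGet? iterabl (-1) with
  | none => 0   -- unreachable under Pre_: empty list raises IndexError in Python
  | some last_elem =>
    (PySem.List.enumerate iterabl).foldl
      (fun start p => if p.2 ≠ last_elem then p.1 + 1 else start) 0

-- ===== PRECONDITION & SPEC =====
-- Python A raises IndexError on the empty list (iterabl[-1]); B raises there too.
def Pre_get_index_of_first_last_repeted_elemen (iterabl : List Int) : Prop := iterabl ≠ []
instance (iterabl : List Int) : Decidable (Pre_get_index_of_first_last_repeted_elemen iterabl) := by unfold Pre_get_index_of_first_last_repeted_elemen; infer_instance
def pvWitness_get_index_of_first_last_repeted_elemen : List Int := [1, 2, 2]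

def Spec_get_index_of_first_last_repeted_elemen (iterabl : List Int) (out : Int) : Prop := out = get_index_of_first_last_repeted_elemen_alt iterabl
instance (iterabl : List Int) (out : Int) : Decidable (Spec_get_index_of_first_last_repeted_elemen iterabl out) := by unfold Spec_get_index_of_first_last_repeted_elemen; infer_instance

-- ===== CLAIM (what is proved, stated in full; the proofs are below) =====
def Claim_equal_get_index_of_first_last_repeted_elemen : Prop := ∀ (iterabl : List Int), Dom_get_index_of_first_last_repeted_elemen iterabl → Pre_get_index_of_first_last_repeted_elemen iterabl → Spec_get_index_of_first_last_repeted_elemen iterabl (get_index_of_first_last_repeted_elemen iterabl)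

-- ===== LEMMAS AND PROOFS =====

-- A's loop computes -(idx + m) where m is the matching-prefix length (or returns r when m = 0)
theorem pvALoop_eq (last : Int) (l : List Int) (idx r : Int) :
    pvALoop last l idx r =
      if (l.takeWhile (fun e => e == last)).length = 0 then r
      else -(idx + ((l.takeWhile (fun e => e == last)).length : Int)) := by
  induction l generalizing idx r with
  | nil => simp [pvALoop]
  | cons e t ih =>
    by_cases h : e = last
    · simp only [pvALoop, h]
      rw [ih]
      simp only [List.takeWhile_cons, beq_self_eq_true, if_true]
      by_cases hm : (t.takeWhile (fun e => e == last)).length = 0 <;>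
        simp [hm] <;> push_cast <;> ring
    · simp [pvALoop, h, List.takeWhile_cons]

-- B's fold over enumerate with start index i
theorem pvBFold_eq (last : Int) (xs : List Int) (i s : Int) :
    (PySem.List.enumerate xs i).foldl
        (fun start p => if p.2 ≠ last then p.1 + 1 else start) s =
      if (xs.reverse.takeWhile (fun e => e == last)).length = xs.length then s
      else i + ((xs.length : Int) - ((xs.reverse.takeWhile (fun e => e == last)).length : Int)) := by
  induction xs generalizing i s with
  | nil => simp
  | cons x t ih =>
    rw [PySem.List.enumerate_cons, List.foldl_cons, ih]
    have htw : (t.reverse ++ [x]).takeWhile (fun e => e == last) =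
        if (t.reverse.takeWhile (fun e => e == last)).length = t.reverse.length
        then t.reverse ++ [x].takeWhile (fun e => e == last)
        else t.reverse.takeWhile (fun e => e == last) := List.takeWhile_append
    have hle : (t.reverse.takeWhile (fun e => e == last)).length ≤ t.length := by
      simpa using (List.takeWhile_prefix (l := t.reverse) (p := fun e => e == last)).length_le
    by_cases hall : (t.reverse.takeWhile (fun e => e == last)).length = t.reverse.length
    · have hlen : (t.reverse.takeWhile (fun e => e == last)).length = t.length := by
        simpa using hall
      by_cases h : x = last
      · subst h
        have hfull : ((t.reverse ++ [x]).takeWhile (fun e => e == x)).length = t.length + 1 := by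
          rw [htw, if_pos hall]; simp
        simp [List.reverse_cons, hfull, hall, hlen]
      · have hxb : (x == last) = false := by simp [h]
        simp only [List.reverse_cons, htw, if_pos hall, List.takeWhile_cons, hxb]
        simp [h, hlen]
    · have hlt : (t.reverse.takeWhile (fun e => e == last)).length ≠ t.length := by
        simpa using hall
      have hlen' : (t.reverse ++ [x]).takeWhile (fun e => e == last) =
          t.reverse.takeWhile (fun e => e == last) := by rw [htw, if_neg hall]
      have hltc : ¬ ((t.reverse ++ [x]).takeWhile (fun e => e == last)).length = t.length + 1 := by
        rw [hlen']; omega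
      by_cases h : x = last
      · simp only [List.reverse_cons, List.length_cons, hltc, if_false, hlen']
        simp [h, hlt]
        push_cast; ring_nf; omega
      · simp only [List.reverse_cons, List.length_cons, hltc, if_false, hlen']
        simp [h, hlt]
        push_cast; ring_nf; omega

-- ===== VERDICT (by name: the statement is the Claim_ definition above) =====
theorem get_index_of_first_last_repeted_elemen_spec : Claim_equal_get_index_of_first_last_repeted_elemen := by
  intro xs _ hne
  unfold Spec_get_index_of_first_last_repeted_elemen
  unfold get_index_of_first_last_repeted_elemen get_index_of_first_last_repeted_elemen_alt
  have hne' : xs ≠ [] := hne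
  rw [PySem.List.pyGet?_neg_one, PySem.List.slice?_none_none_neg_one,
    List.getLast?_eq_getLast hne']
  simp only
  rw [pvALoop_eq, pvBFold_eq]
  have hrev : xs.reverse = xs.getLast hne' :: xs.dropLast.reverse := by
    conv_lhs => rw [← List.dropLast_append_getLast hne']
    rw [List.reverse_append]; simp
  have hm0 : (xs.reverse.takeWhile (fun e => e == xs.getLast hne')).length ≠ 0 := by
    rw [hrev]; simp [List.takeWhile_cons]
  have hmle : (xs.reverse.takeWhile (fun e => e == xs.getLast hne')).length ≤ xs.length := by
    simpa using (List.takeWhile_prefix (l := xs.reverse)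
      (p := fun e => e == xs.getLast hne')).length_le
  rw [if_neg hm0]
  by_cases hml : (xs.reverse.takeWhile (fun e => e == xs.getLast hne')).length = xs.length
  · rw [if_pos hml]; omega
  · rw [if_neg hml]; omega
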